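-- pv_equiv track=rewrite | github.com/MrBrantCode/unitest_baseline | mut_generate/mist_train_taco/taco_17423/solution.py | check_string_pattern
-- ===== SOURCE A (Python) =====
-- def check_string_pattern(input_string: str) -> str:
--     def char_to_index(c: str) -> int:
--         return ord(c) - ord('A')
--
--     if len(input_string) <= 2:
--         return 'YES'
--
--     a = char_to_index(input_string[0])
--     b = char_to_index(input_string[1])
--
--     for i in range(2, len(input_string)):
--         c = char_to_index(input_string[i])
--         if (a + b) % 26 != c:
--             return 'NO'
--         a, b = b, c
--
--     return 'YES'
-- ===== SOURCE B (Python) =====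
-- def check_string_pattern(input_string: str) -> str:
--     n = len(input_string)
--     if n <= 2:
--         return 'YES'
--     idx = [ord(c) - ord('A') for c in input_string]
--     exp = idx[:2]
--     for _ in range(2, n):
--         exp.append((exp[-2] + exp[-1]) % 26)
--     return 'YES' if exp == idx else 'NO'
-- ===== Notes on version B (the rewrite author's own statement) =====
-- stated objective: alternative
-- what changed: B materializes the full expected index sequence from the first two characters (generate phase) and then returns YES iff it equals the actual index sequence (compare phase), instead of A's inline invariant check with early exit.
import Mathlib
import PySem

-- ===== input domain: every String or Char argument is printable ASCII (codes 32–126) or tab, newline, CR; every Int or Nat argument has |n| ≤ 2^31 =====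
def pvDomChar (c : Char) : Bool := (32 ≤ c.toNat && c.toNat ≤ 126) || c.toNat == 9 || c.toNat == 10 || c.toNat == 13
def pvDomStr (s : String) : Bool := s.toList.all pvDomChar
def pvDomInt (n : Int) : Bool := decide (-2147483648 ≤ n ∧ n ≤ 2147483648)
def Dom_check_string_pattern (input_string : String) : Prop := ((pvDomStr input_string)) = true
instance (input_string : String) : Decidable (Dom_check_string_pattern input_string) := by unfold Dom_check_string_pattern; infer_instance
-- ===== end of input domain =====

-- B regenerates the expected index sequence from the first two characters and compares it with
-- the actual one, instead of A's inline invariant check with early exit ('alternative', same cost).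

-- ===== PORT A =====
-- A's for-loop over i = 2 .. n-1 with early 'return NO', carrying (a, b).
def pvALoop : Int → Int → List Char → String
  | _, _, [] => "YES"
  | a, b, ch :: rest =>
    let c : Int := (ch.toNat : Int) - 65
    if PySem.Int.mod (a + b) 26 ≠ c then "NO" else pvALoop b c rest

def check_string_pattern (input_string : String) : String :=
  let cs := input_string.toList
  if cs.length ≤ 2 then "YES"
  else
    match cs with
    | c0 :: c1 :: rest => pvALoop ((c0.toNat : Int) - 65) ((c1.toNat : Int) - 65) rest
    | _ => "YES"

-- ===== PORT B =====
-- generate phase: the n remaining expected indices after seeds (a, b)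
def pvGen : Int → Int → Nat → List Int
  | _, _, 0 => []
  | a, b, n + 1 =>
    let c := PySem.Int.mod (a + b) 26
    c :: pvGen b c n

def check_string_pattern_alt (input_string : String) : String :=
  let cs := input_string.toList
  let n := cs.length
  if n ≤ 2 then "YES"
  else
    let idx := cs.map (fun ch => (ch.toNat : Int) - 65)
    let a := idx.headI
    let b := (idx.drop 1).headI
    let exp := a :: b :: pvGen a b (n - 2)
    if exp = idx then "YES" else "NO"

-- ===== PRECONDITION & SPEC =====
def Spec_check_string_pattern (input_string : String) (out : String) : Prop := out = check_string_pattern_alt input_string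
instance (input_string : String) (out : String) : Decidable (Spec_check_string_pattern input_string out) := by unfold Spec_check_string_pattern; infer_instance

-- ===== CLAIM (what is proved, stated in full; the proofs are below) =====
def Claim_equal_check_string_pattern : Prop := ∀ (input_string : String), Dom_check_string_pattern input_string → Spec_check_string_pattern input_string (check_string_pattern input_string)

-- ===== LEMMAS AND PROOFS =====

-- A's early-exit loop returns YES iff B's generated tail equals the actual tail.
theorem pvALoop_eq_gen (rest : List Char) : ∀ (a b : Int),
    pvALoop a b rest =
      if pvGen a b rest.length = rest.map (fun ch => (ch.toNat : Int) - 65) then "YES" else "NO" := by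
  induction rest with
  | nil => intro a b; simp [pvALoop, pvGen]
  | cons ch rest ih =>
    intro a b
    simp only [pvALoop, List.length_cons, List.map_cons, pvGen, List.cons.injEq]
    rw [ih, PySem.Int.mod_eq_emod_of_pos (by norm_num : (0:Int) < 26)]
    by_cases h : (a + b) % 26 = (ch.toNat : Int) - 65
    · rw [if_neg (by simp [h]), h]
      by_cases h2 : pvGen b ((ch.toNat : Int) - 65) rest.length
          = rest.map (fun ch => (ch.toNat : Int) - 65)
      · rw [if_pos h2, if_pos ⟨rfl, h2⟩]
      · rw [if_neg h2, if_neg (by simp [h2])]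
    · rw [if_pos h, if_neg (by simp [h])]

theorem check_string_pattern_eq (s : String) :
    check_string_pattern s = check_string_pattern_alt s := by
  unfold check_string_pattern check_string_pattern_alt
  cases hcs : s.toList with
  | nil => simp
  | cons c0 t0 =>
    cases t0 with
    | nil => simp
    | cons c1 rest =>
      by_cases hlen : (c0 :: c1 :: rest).length ≤ 2
      · have : rest = [] := by
          cases rest with
          | nil => rfl
          | cons _ _ => simp at hlen
        simp [this]
      · simp only [hlen, if_false, List.map_cons]
        
        rw [pvALoop_eq_gen]
        have hn : (c0 :: c1 :: rest).length - 2 = rest.length := by simp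
        rw [hn]
        by_cases h : pvGen ((c0.toNat : Int) - 65) ((c1.toNat : Int) - 65) rest.length
            = rest.map (fun ch => (ch.toNat : Int) - 65)
        · simp [h]
        · simp [h]

-- ===== VERDICT (by name: the statement is the Claim_ definition above) =====
theorem check_string_pattern_spec : Claim_equal_check_string_pattern := by
  intro s _
  unfold Spec_check_string_pattern
  exact check_string_pattern_eq s
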